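-- pv_equiv track=rewrite | github.com/whereami2048/Algorithm_Study | 프로그래머스/2/142085. 디펜스 게임/디펜스 게임.py | solution
-- ===== SOURCE A (Python) =====
-- import heapq
--
-- def solution(n, k, enemy):
--
--     if k >= len(enemy):
--         return len(enemy)
--
--     queue = []
--
--     for i in range(len(enemy)):
--         heapq.heappush(queue, enemy[i])
--         if len(queue) > k:
--             last = heapq.heappop(queue)
--
--             if last > n:
--                 return i
--             n -= last
--
--     return len(enemy)
-- ===== SOURCE B (Python) =====
-- def solution(n, k, enemy):
--     L = len(enemy)
--     if k >= L:
--         return L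
--     # decide-and-verify over prefixes: the defense dies at round m (0-indexed m-1)
--     # exactly when the sum of the (m - k) smallest of the first m enemies exceeds n
--     for m in range(max(k, 0) + 1, L + 1):
--         if sum(sorted(enemy[:m])[:m - k]) > n:
--             return m - 1
--     return L
-- ===== Notes on version B (the rewrite author's own statement) =====
-- stated objective: alternative
-- what changed: Replaces the incremental min-heap simulation (push each enemy, pop the smallest once the heap exceeds k, decrementing n) by a stateless decide-and-verify scan: for each candidate round count m it independently checks whether the sum of the m-k smallest of the first m enemies exceeds the original n, returning m-1 at the first failure.
import Mathlib
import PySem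

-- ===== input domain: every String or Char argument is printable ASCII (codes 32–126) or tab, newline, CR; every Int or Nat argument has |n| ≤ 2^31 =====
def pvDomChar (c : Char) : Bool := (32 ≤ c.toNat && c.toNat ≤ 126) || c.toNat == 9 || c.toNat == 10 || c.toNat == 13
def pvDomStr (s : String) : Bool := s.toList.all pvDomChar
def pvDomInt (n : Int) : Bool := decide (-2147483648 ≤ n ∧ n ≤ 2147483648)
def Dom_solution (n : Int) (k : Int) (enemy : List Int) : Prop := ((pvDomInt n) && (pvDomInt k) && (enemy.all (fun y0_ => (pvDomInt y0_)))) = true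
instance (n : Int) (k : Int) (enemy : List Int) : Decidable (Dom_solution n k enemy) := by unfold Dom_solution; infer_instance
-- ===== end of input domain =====

-- B replaces A's incremental min-heap pass with a stateless decide-and-verify scan over
-- prefix lengths (same value everywhere; alternative decomposition, not claimed faster).


-- ===== PORT A =====
-- heapq min-heap modelled as its multiset of entries (a list): heappush = cons,
-- heappop = remove the minimum (entries are Ints, so tie order is value-irrelevant).
def solAux (k : Int) (queue : List Int) (n : Int) (i : Int) : List Int → Option Int
  | [] => none
  | e :: rest =>
    if ((e :: queue).length : Int) > k then           -- heappush; if len(queue) > k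
      if queue.foldl min e > n then some i            -- last = heappop(queue); if last > n
      else solAux k ((e :: queue).erase (queue.foldl min e)) (n - (queue.foldl min e)) (i + 1) rest
    else solAux k (e :: queue) n (i + 1) rest

def solution (n : Int) (k : Int) (enemy : List Int) : Int :=
  if k ≥ (enemy.length : Int) then (enemy.length : Int)
  else (solAux k [] n 0 enemy).getD (enemy.length : Int)

-- ===== PORT B =====
-- sum(sorted(enemy[:m])[:m - k])
def altCost (k : Int) (enemy : List Int) (m : Int) : Int :=
  (PySem.List.slice (PySem.List.sorted (PySem.List.slice enemy none (some m)) (fun x => x) false)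
    none (some (m - k))).sum

-- for m in range(max(k, 0) + 1, L + 1): if cost > n: return m - 1
def altAux (n : Int) (k : Int) (enemy : List Int) : List Int → Option Int
  | [] => none
  | m :: ms => if altCost k enemy m > n then some (m - 1) else altAux n k enemy ms

def solution_alt (n : Int) (k : Int) (enemy : List Int) : Int :=
  if k ≥ (enemy.length : Int) then (enemy.length : Int)
  else (altAux n k enemy (PySem.List.pyRange (max k 0 + 1) ((enemy.length : Int) + 1) 1)).getD
        (enemy.length : Int)

-- ===== PRECONDITION & SPEC =====
def Spec_solution (n : Int) (k : Int) (enemy : List Int) (out : Int) : Prop := out = solution_alt n k enemy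
instance (n : Int) (k : Int) (enemy : List Int) (out : Int) : Decidable (Spec_solution n k enemy out) := by unfold Spec_solution; infer_instance

-- ===== CLAIM (what is proved, stated in full; the proofs are below) =====
def Claim_equal_solution : Prop := ∀ (n : Int) (k : Int) (enemy : List Int), Dom_solution n k enemy → Spec_solution n k enemy (solution n k enemy)

-- ===== LEMMAS AND PROOFS =====

-- sum of the t smallest elements of xs
def smSum (xs : List Int) (t : Nat) : Int :=
  ((PySem.List.sorted xs (fun x => x) false).take t).sum

theorem foldl_min_of_le (x : Int) (Q : List Int) (h : ∀ y ∈ Q, x ≤ y) :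
    Q.foldl min x = x := by
  induction Q generalizing x with
  | nil => rfl
  | cons a Q ih =>
    have hx : min x a = x := min_eq_left (h a (by simp))
    simp only [List.foldl_cons, hx]
    exact ih x (fun y hy => h y (by simp [hy]))

-- the push-then-pop-min step on a sorted list L with its t smallest already removed
theorem oi_step (L : List Int) (e : Int) (t : Nat) (hs : List.Pairwise (· ≤ ·) L) :
    (L.take t).sum + (L.drop t).foldl min e
        = ((List.orderedInsert (· ≤ ·) e L).take (t + 1)).sum
    ∧ ((e :: L.drop t).erase ((L.drop t).foldl min e)).Perm
        ((List.orderedInsert (· ≤ ·) e L).drop (t + 1)) := by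
  induction L generalizing t with
  | nil =>
    simp [List.orderedInsert]
  | cons a L ih =>
    have ha : ∀ y ∈ L, a ≤ y := (List.pairwise_cons.1 hs).1
    have hsL : List.Pairwise (· ≤ ·) L := (List.pairwise_cons.1 hs).2
    cases t with
    | zero =>
      by_cases hea : e ≤ a
      · have hmin : ((a :: L).foldl min e) = e := by
          apply foldl_min_of_le
          intro y hy
          rcases List.mem_cons.1 hy with h | h
          · omega
          · exact le_trans hea (ha y h)
        simp [List.orderedInsert, hea, hmin]
      · have hmin : ((a :: L).foldl min e) = a := by
          have : min e a = a := min_eq_right (by omega)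
          simp only [List.foldl_cons, this]
          exact foldl_min_of_le a L ha
        constructor
        · simp [List.orderedInsert, hea, hmin]
        · have hne : e ≠ a := by omega
          simp only [List.drop_zero, hmin, List.orderedInsert, if_neg hea, List.drop_succ_cons,
            List.drop_zero]
          rw [List.erase_cons_tail (by simp [hne]), List.erase_cons_head]
          exact (List.perm_orderedInsert _ e L).symm
    | succ s =>
      by_cases hea : e ≤ a
      · have hmin : ((L.drop s).foldl min e) = e := by
          apply foldl_min_of_le
          intro y hy
          exact le_trans hea (ha y (List.mem_of_mem_drop hy))
        constructor
        · simp only [List.take_succ_cons, List.sum_cons, List.drop_succ_cons, hmin,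
            List.orderedInsert, if_pos hea]
          ring
        · simp [List.orderedInsert, hea, hmin]
      · obtain ⟨ihsum, ihperm⟩ := ih s hsL
        constructor
        · simp only [List.take_succ_cons, List.sum_cons, List.drop_succ_cons,
            List.orderedInsert, if_neg hea]
          rw [add_assoc, ihsum]
        · simpa [List.orderedInsert, if_neg hea] using ihperm

-- sorting the prefix extended by e is ordered insertion into the sorted prefix
theorem sorted_append_singleton (done : List Int) (e : Int) :
    PySem.List.sorted (done ++ [e]) (fun x => x) false
      = List.orderedInsert (· ≤ ·) e (PySem.List.sorted done (fun x => x) false) := by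
  apply PySem.List.sorted_id_eq_of_perm_of_pairwise
  · have h1 := List.perm_orderedInsert (fun x1 x2 : Int => x1 ≤ x2) e
      (PySem.List.sorted done (fun x => x) false)
    have h2 : (PySem.List.sorted done (fun x : Int => x) false).Perm done :=
      PySem.List.sorted_perm done (fun x => x) false
    have h3 : (e :: done).Perm (done ++ [e]) := by
      simpa using (List.perm_append_comm (l₁ := [e]) (l₂ := done))
    exact h1.trans ((h2.cons e).trans h3)
  · exact List.Pairwise.orderedInsert e _ (PySem.List.sorted_pairwise done (fun x => x))

theorem altCost_eq (k : Int) (enemy : List Int) (m : Nat) (hk : k < (m : Int)) :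
    altCost k enemy (m : Int) = smSum (enemy.take m) (((m : Int) - k).toNat) := by
  unfold altCost smSum
  rw [PySem.List.slice_to enemy (by omega : (0:Int) ≤ (m : Int)),
      PySem.List.slice_to _ (by omega : (0:Int) ≤ (m : Int) - k)]
  simp

theorem smSum_nil (t : Nat) : smSum [] t = 0 := by
  simp [smSum, PySem.List.sorted]

-- main loop invariant: A at prefix `done` (heap ≃ sorted prefix minus its t smallest,
-- budget decremented by their sum) computes the same Option as B's remaining scan
theorem main_loop (n k : Int) (rest : List Int) : ∀ (done queue : List Int),
    queue.Perm ((PySem.List.sorted done (fun x => x) false).drop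
        (((done.length : Int) - k).toNat)) →
    solAux k queue (n - smSum done (((done.length : Int) - k).toNat)) (done.length : Int) rest
      = altAux n k (done ++ rest)
          (PySem.List.pyRange (max (done.length : Int) (max k 0) + 1)
            ((done.length : Int) + (rest.length : Int) + 1) 1) := by
  induction rest with
  | nil =>
    intro done queue hq
    have hnil : PySem.List.pyRange (max (done.length : Int) (max k 0) + 1)
        ((done.length : Int) + (([] : List Int).length : Int) + 1) 1 = [] :=
      PySem.List.pyRange_one_eq_nil (by simp only [List.length_nil, Nat.cast_zero]; omega)
    rw [hnil]
    simp [solAux, altAux]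
  | cons e rest ih =>
    intro done queue hq
    have hlenL0 : (PySem.List.sorted done (fun x => x) false).length = done.length :=
      PySem.List.length_sorted done _ _
    set d : Nat := done.length with hd
    set L0 : List Int := PySem.List.sorted done (fun x => x) false with hL0
    set t : Nat := (((d : Int)) - k).toNat with ht
    have hqlen : queue.length = d - min t d := by
      rw [hq.length_eq, List.length_drop, hlenL0]
      omega
    set x : Int := queue.foldl min e with hx
    have hxe : x = (L0.drop t).foldl min e := hq.foldl_eq e
    simp only [solAux]
    by_cases hk1 : ((d : Int) + 1 > k)
    · -- pop branch: round m = d + 1 is checked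
      have hcondT : (((e :: queue).length : Int) > k) := by
        simp only [List.length_cons, hqlen]
        push_cast
        omega
      rw [if_pos hcondT]
      obtain ⟨hsum, hperm⟩ := oi_step L0 e t (PySem.List.sorted_pairwise done (fun x => x))
      have hOI : PySem.List.sorted (done ++ [e]) (fun x => x) false
          = List.orderedInsert (· ≤ ·) e L0 := sorted_append_singleton done e
      have hsm1 : smSum (done ++ [e]) (t + 1) = smSum done t + x := by
        unfold smSum
        rw [hOI, ← hsum, hxe]
      have htake : (done ++ e :: rest).take (d + 1) = done ++ [e] := by
        have h : done ++ e :: rest = (done ++ [e]) ++ rest := by simp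
        rw [h]
        exact List.take_left' (by simp [hd])
      have hrange : PySem.List.pyRange (max (d : Int) (max k 0) + 1)
          ((d : Int) + ((e :: rest).length : Int) + 1) 1
          = ((d : Int) + 1) :: PySem.List.pyRange ((d : Int) + 1 + 1)
              ((d : Int) + ((e :: rest).length : Int) + 1) 1 := by
        rw [show max (d : Int) (max k 0) = (d : Int) from by omega]
        exact PySem.List.pyRange_one_cons (by simp only [List.length_cons]; push_cast; omega)
      have hcost : altCost k (done ++ e :: rest) ((d : Int) + 1) = smSum done t + x := by
        rw [show ((d : Int) + 1) = (((d + 1 : Nat)) : Int) from by push_cast; ring,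
            altCost_eq k _ (d + 1) (by push_cast; omega), htake,
            show ((((d + 1 : Nat) : Int)) - k).toNat = t + 1 from by push_cast; omega]
        exact hsm1
      rw [hrange]
      simp only [altAux, hcost]
      by_cases hdie : x > n - smSum done t
      · rw [if_pos hdie, if_pos (by omega : smSum done t + x > n)]
        congr 1
        omega
      · rw [if_neg hdie, if_neg (by omega : ¬ (smSum done t + x > n))]
        have hinv : ((e :: queue).erase x).Perm
            ((PySem.List.sorted (done ++ [e]) (fun x => x) false).drop
              ((((done ++ [e]).length : Int)) - k).toNat) := by
          rw [hOI, show ((((done ++ [e]).length : Int)) - k).toNat = t + 1 from by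
            simp only [List.length_append, List.length_singleton]; push_cast; omega]
          exact (List.Perm.erase x (hq.cons e)).trans (by rw [hxe]; exact hperm)
        have h := ih (done ++ [e]) ((e :: queue).erase x) hinv
        rw [show smSum (done ++ [e]) ((((done ++ [e]).length : Int)) - k).toNat
              = smSum done t + x from by
            rw [show ((((done ++ [e]).length : Int)) - k).toNat = t + 1 from by
              simp only [List.length_append, List.length_singleton]; push_cast; omega]
            exact hsm1] at h
        rw [show n - (smSum done t + x) = n - smSum done t - x from by ring] at h
        rw [show (((done ++ [e]).length : Nat) : Int) = (d : Int) + 1 from by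
          simp [hd]] at h
        rw [show (done ++ [e]) ++ rest = done ++ e :: rest from by simp] at h
        rw [show max ((d : Int) + 1) (max k 0) = (d : Int) + 1 from by omega] at h
        rw [show (d : Int) + 1 + ((rest.length : Nat) : Int) + 1
              = (d : Int) + (((e :: rest).length : Nat) : Int) + 1 from by
          simp; ring] at h
        exact h
    · -- no pop: d + 1 ≤ k, so k = max k 0 and B's pending range is unchanged
      have hcondF : ¬ (((e :: queue).length : Int) > k) := by
        simp only [List.length_cons, hqlen]
        push_cast
        omega
      rw [if_neg hcondF]
      have ht0 : t = 0 := by omega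
      have hinv : (e :: queue).Perm
          ((PySem.List.sorted (done ++ [e]) (fun x => x) false).drop
            ((((done ++ [e]).length : Int)) - k).toNat) := by
        rw [show ((((done ++ [e]).length : Int)) - k).toNat = 0 from by
          simp only [List.length_append, List.length_singleton]; push_cast; omega]
        rw [List.drop_zero]
        have hperm2 : (PySem.List.sorted (done ++ [e]) (fun x => x) false).Perm (done ++ [e]) :=
          PySem.List.sorted_perm _ _ _
        refine ((hq.cons e).trans ?_).trans hperm2.symm
        rw [ht0, List.drop_zero]
        have hpermL0 : L0.Perm done := PySem.List.sorted_perm done (fun x => x) false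
        refine (hpermL0.cons e).trans ?_
        simpa using (List.perm_append_comm (l₁ := [e]) (l₂ := done))
      have h := ih (done ++ [e]) (e :: queue) hinv
      rw [show smSum (done ++ [e]) ((((done ++ [e]).length : Int)) - k).toNat = 0 from by
        rw [show ((((done ++ [e]).length : Int)) - k).toNat = 0 from by
          simp only [List.length_append, List.length_singleton]; push_cast; omega]
        simp [smSum]] at h
      rw [show (((done ++ [e]).length : Nat) : Int) = (d : Int) + 1 from by simp [hd]] at h
      rw [show (done ++ [e]) ++ rest = done ++ e :: rest from by simp] at h
      rw [show max ((d : Int) + 1) (max k 0) = max (d : Int) (max k 0) from by omega] at h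
      rw [show (d : Int) + 1 + ((rest.length : Nat) : Int) + 1
            = (d : Int) + (((e :: rest).length : Nat) : Int) + 1 from by simp; ring] at h
      rw [show smSum done t = 0 from by rw [ht0]; simp [smSum]]
      rw [show n - 0 = n from by ring]
      rw [show n - 0 = n from by ring] at h
      exact h

-- ===== VERDICT (by name: the statement is the Claim_ definition above) =====
theorem solution_spec : Claim_equal_solution := by
  intro n k enemy _
  unfold Spec_solution solution solution_alt
  by_cases hk : k ≥ (enemy.length : Int)
  · rw [if_pos hk, if_pos hk]
  · rw [if_neg hk, if_neg hk]
    have h := main_loop n k enemy [] [] (by simp)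
    rw [smSum_nil, show n - 0 = n from by ring] at h
    simp only [List.length_nil, Nat.cast_zero, List.nil_append, zero_add] at h
    rw [show max (0 : Int) (max k 0) = max k 0 from by omega] at h
    rw [h]
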